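-- pv_equiv track=rewrite | github.com/dimitri-rusin/oll_onemax | src/rounding.py | simplify
-- ===== SOURCE A (Python) =====
-- def simplify(policy, action_space, decision):
--   simplified_policy = {}
--   for key, value in policy.items():
--     if value in action_space:
--       simplified_policy[key] = value
--     else:
--       if decision == "rounded_down_policy":
--         smaller_nums = [x for x in action_space if x < value]
--         simplified_policy[key] = max(smaller_nums) if smaller_nums else value
--       elif decision == "rounded_up_policy":
--         greater_nums = [x for x in action_space if x > value]
--         simplified_policy[key] = min(greater_nums) if greater_nums else value
--   return simplified_policy
-- ===== SOURCE B (Python) =====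
-- def _upper(arr, v):
--   # first index i with arr[i] > v (arr strictly increasing)
--   lo, hi = 0, len(arr)
--   while lo < hi:
--     mid = (lo + hi) // 2
--     if arr[mid] <= v:
--       lo = mid + 1
--     else:
--       hi = mid
--   return lo
--
-- def simplify(policy, action_space, decision):
--   aset = set(action_space)
--   arr = sorted(aset)
--   simplified_policy = {}
--   for key, value in policy.items():
--     if value in aset:
--       simplified_policy[key] = value
--     else:
--       i = _upper(arr, value)
--       if decision == "rounded_down_policy":
--         simplified_policy[key] = arr[i - 1] if i > 0 else value
--       elif decision == "rounded_up_policy":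
--         simplified_policy[key] = arr[i] if i < len(arr) else value
--   return simplified_policy
-- ===== Notes on version B (the rewrite author's own statement) =====
-- stated objective: faster
-- what changed: Instead of scanning action_space per policy entry (membership test plus building and max/min-ing a filtered copy), B deduplicates and sorts action_space once and answers each entry with a set-membership test and one hand-rolled binary search that yields both the nearest-below and nearest-above neighbour.
import Mathlib
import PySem

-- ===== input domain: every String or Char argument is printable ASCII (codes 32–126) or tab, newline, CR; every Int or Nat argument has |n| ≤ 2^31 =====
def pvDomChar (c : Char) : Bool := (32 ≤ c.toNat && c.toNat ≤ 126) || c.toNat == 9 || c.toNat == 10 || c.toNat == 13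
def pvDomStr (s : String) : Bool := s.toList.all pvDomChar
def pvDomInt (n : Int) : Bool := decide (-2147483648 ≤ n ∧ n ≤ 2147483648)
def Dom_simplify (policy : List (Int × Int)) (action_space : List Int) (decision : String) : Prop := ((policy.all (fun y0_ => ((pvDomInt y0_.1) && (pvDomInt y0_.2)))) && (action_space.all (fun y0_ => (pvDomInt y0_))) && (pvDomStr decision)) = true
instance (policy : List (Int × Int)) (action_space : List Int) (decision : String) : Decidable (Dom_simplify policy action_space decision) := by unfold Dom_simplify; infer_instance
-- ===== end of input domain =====

-- B replaces A's per-entry linear scans of action_space (membership + max/min of a filtered copy)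
-- by one sorted deduplicated array queried with a hand-rolled binary search; equivalence of RETURN values.

-- ===== PORT A =====
def simplify (policy : List (Int × Int)) (action_space : List Int) (decision : String) : List (Int × Int) :=
  let pol := PySem.Dict.ofList policy
  (pol.items.foldl (fun sp kv =>
    if kv.2 ∈ action_space then
      sp.insert kv.1 kv.2
    else if decision = "rounded_down_policy" then
      let smaller := action_space.filter (fun x => x < kv.2)
      sp.insert kv.1 (match PySem.List.max? smaller (fun x => x) with
        | some m => m
        | none => kv.2)
    else if decision = "rounded_up_policy" then
      let greater := action_space.filter (fun x => kv.2 < x)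
      sp.insert kv.1 (match PySem.List.min? greater (fun x => x) with
        | some m => m
        | none => kv.2)
    else sp) PySem.Dict.empty).items

-- ===== PORT B =====
-- _upper from Source B: first index i with arr[i] > v; arr[mid] is always in range, getD's default is never read
def simplifyUpper (arr : List Int) (v : Int) (lo hi : Nat) : Nat :=
  if _h : lo < hi then
    let mid := (lo + hi) / 2
    if arr.getD mid 0 ≤ v then simplifyUpper arr v (mid + 1) hi
    else simplifyUpper arr v lo mid
  else lo
termination_by hi - lo
decreasing_by all_goals omega

def simplify_alt (policy : List (Int × Int)) (action_space : List Int) (decision : String) : List (Int × Int) :=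
  let aset := PySem.Set.ofList action_space
  let arr := PySem.List.sorted aset (fun x => x)
  let pol := PySem.Dict.ofList policy
  (pol.items.foldl (fun sp kv =>
    if kv.2 ∈ aset then
      sp.insert kv.1 kv.2
    else
      let i := simplifyUpper arr kv.2 0 arr.length
      if decision = "rounded_down_policy" then
        sp.insert kv.1 (if 0 < i then arr.getD (i - 1) kv.2 else kv.2)
      else if decision = "rounded_up_policy" then
        sp.insert kv.1 (if i < arr.length then arr.getD i kv.2 else kv.2)
      else sp) PySem.Dict.empty).items

-- ===== PRECONDITION & SPEC =====
def Spec_simplify (policy : List (Int × Int)) (action_space : List Int) (decision : String) (out : List (Int × Int)) : Prop := out = simplify_alt policy action_space decision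
instance (policy : List (Int × Int)) (action_space : List Int) (decision : String) (out : List (Int × Int)) : Decidable (Spec_simplify policy action_space decision out) := by unfold Spec_simplify; infer_instance

-- ===== CLAIM (what is proved, stated in full; the proofs are below) =====
def Claim_equal_simplify : Prop := ∀ (policy : List (Int × Int)) (action_space : List Int) (decision : String), Dom_simplify policy action_space decision → Spec_simplify policy action_space decision (simplify policy action_space decision)

-- ===== LEMMAS AND PROOFS =====

-- a strictly increasing list is monotone at getD-indices
lemma getD_mono_of_pairwise_lt (arr : List Int) (hs : arr.Pairwise (· < ·))
    (i j : Nat) (hij : i ≤ j) (hj : j < arr.length) :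
    arr.getD i 0 ≤ arr.getD j 0 := by
  rcases Nat.lt_or_ge i j with h | h
  · have := (List.pairwise_iff_getElem.mp hs) i j (by omega) hj h
    rw [List.getD_eq_getElem arr 0 (by omega), List.getD_eq_getElem arr 0 hj]
    exact le_of_lt this
  · have : i = j := by omega
    subst this; rfl

-- invariant of the binary search: everything left of the result is ≤ v, everything from it on is > v
lemma simplifyUpper_spec (arr : List Int) (v : Int)
    (hmono : ∀ i j, i ≤ j → j < arr.length → arr.getD i 0 ≤ arr.getD j 0) :
    ∀ lo hi, lo ≤ hi → hi ≤ arr.length →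
    (∀ j, j < lo → arr.getD j 0 ≤ v) →
    (∀ j, hi ≤ j → j < arr.length → v < arr.getD j 0) →
    (∀ j, j < simplifyUpper arr v lo hi → arr.getD j 0 ≤ v) ∧
    (∀ j, simplifyUpper arr v lo hi ≤ j → j < arr.length → v < arr.getD j 0) ∧
    simplifyUpper arr v lo hi ≤ arr.length := by
  intro lo hi
  induction lo, hi using simplifyUpper.induct arr v with
  | case1 lo hi h mid hle ih =>
    intro hlh hhl hlow hhigh
    have hstep : simplifyUpper arr v lo hi = simplifyUpper arr v (mid + 1) hi := by
      rw [simplifyUpper, dif_pos h]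
      show (if arr.getD mid 0 ≤ v then simplifyUpper arr v (mid + 1) hi
            else simplifyUpper arr v lo mid) = _
      rw [if_pos hle]
    rw [hstep]
    exact ih (by omega) hhl
      (fun j hj => le_trans (hmono j mid (by omega) (by omega)) hle)
      hhigh
  | case2 lo hi h mid hgt ih =>
    intro hlh hhl hlow hhigh
    have hstep : simplifyUpper arr v lo hi = simplifyUpper arr v lo mid := by
      rw [simplifyUpper, dif_pos h]
      show (if arr.getD mid 0 ≤ v then simplifyUpper arr v (mid + 1) hi
            else simplifyUpper arr v lo mid) = _
      rw [if_neg hgt]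
    rw [hstep]
    exact ih (by omega) (by omega) hlow
      (fun j hj hjl => lt_of_lt_of_le (lt_of_not_ge hgt) (hmono mid j (by omega) hjl))
  | case3 lo hi h =>
    intro hlh hhl hlow hhigh
    rw [simplifyUpper, dif_neg h]
    exact ⟨hlow, fun j hj hjl => hhigh j (by omega) hjl, by omega⟩

-- the rounded-down value computed from the sorted array equals A's max-of-smaller
lemma down_eq (as : List Int) (v : Int) (hv : v ∉ as) :
    (match PySem.List.max? (as.filter (fun x => x < v)) (fun x => x) with
      | some m => m
      | none => v) =
    (let arr := PySem.List.sorted (PySem.Set.ofList as) (fun x => x)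
     let i := simplifyUpper arr v 0 arr.length
     if 0 < i then arr.getD (i - 1) v else v) := by
  set arr := PySem.List.sorted (PySem.Set.ofList as) (fun x => x) with harr
  have hpw : arr.Pairwise (· < ·) := PySem.List.sorted_ofList_pairwise_lt as
  have hmem : ∀ x, x ∈ arr ↔ x ∈ as := by
    intro x
    rw [harr, PySem.List.mem_sorted, PySem.Set.mem_ofList]
  have hmono := getD_mono_of_pairwise_lt arr hpw
  obtain ⟨h1, h2, h3⟩ := simplifyUpper_spec arr v hmono 0 arr.length
    (by omega) (le_refl _) (by omega) (by omega)
  set i := simplifyUpper arr v 0 arr.length with hi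
  by_cases hpos : 0 < i
  · -- i > 0 : arr[i-1] is the greatest element < v
    have hi1 : i - 1 < arr.length := by omega
    have hm1 : arr.getD (i - 1) v = arr[i - 1] := List.getD_eq_getElem arr v hi1
    have hm0 : arr.getD (i - 1) 0 = arr[i - 1] := List.getD_eq_getElem arr 0 hi1
    set m := arr[i - 1] with hmdef
    have hmas : m ∈ as := (hmem m).mp (List.getElem_mem hi1)
    have hmle : m < v := by
      have := h1 (i - 1) (by omega)
      rw [hm0] at this
      rcases lt_or_eq_of_le this with h | h
      · exact h
      · exact absurd (h ▸ hmas) hv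
    have hmf : m ∈ as.filter (fun x => x < v) := by
      simp [List.mem_filter, hmas, hmle]
    have hne : as.filter (fun x => x < v) ≠ [] := List.ne_nil_of_mem hmf
    obtain ⟨m', hm'⟩ : ∃ m', PySem.List.max? (as.filter (fun x => x < v)) (fun x => x) = some m' := by
      cases hcase : PySem.List.max? (as.filter (fun x => x < v)) (fun x => x) with
      | none => exact absurd ((PySem.List.max?_eq_none_iff _ _).mp hcase) hne
      | some m' => exact ⟨m', rfl⟩
    have hm'mem : m' ∈ as.filter (fun x => x < v) := PySem.List.max?_mem hm'
    have hm'as : m' ∈ as := (List.mem_filter.mp hm'mem).1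
    have hm'lt : m' < v := by simpa using (List.mem_filter.mp hm'mem).2
    -- m' sits at some index j < i, hence m' ≤ m
    obtain ⟨j, hjl, hje⟩ := List.mem_iff_getElem.mp ((hmem m').mpr hm'as)
    have hji : j < i := by
      by_contra hc
      have := h2 j (by omega) hjl
      rw [List.getD_eq_getElem arr 0 hjl, hje] at this
      omega
    have hle1 : m' ≤ m := by
      have := hmono j (i - 1) (by omega) hi1
      rw [List.getD_eq_getElem arr 0 hjl, hje, hm0] at this
      exact this
    have hle2 : m ≤ m' := PySem.List.max?_isMax hm' m hmf
    have heq : m' = m := le_antisymm hle1 hle2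
    simp only [hm', heq, ← hi, if_pos hpos, hm1]
  · -- i = 0 : no element of as is < v
    have hfe : as.filter (fun x => x < v) = [] := by
      rw [List.filter_eq_nil_iff]
      intro x hx
      obtain ⟨j, hjl, hje⟩ := List.mem_iff_getElem.mp ((hmem x).mpr hx)
      have := h2 j (by omega) hjl
      rw [List.getD_eq_getElem arr 0 hjl, hje] at this
      simp
      omega
    have hnone : PySem.List.max? ([] : List Int) (fun x => x) = none :=
      (PySem.List.max?_eq_none_iff _ _).mpr rfl
    rw [hfe]
    simp only [hnone, ← hi, if_neg hpos]

-- the rounded-up value computed from the sorted array equals A's min-of-greater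
lemma up_eq (as : List Int) (v : Int) (_hv : v ∉ as) :
    (match PySem.List.min? (as.filter (fun x => v < x)) (fun x => x) with
      | some m => m
      | none => v) =
    (let arr := PySem.List.sorted (PySem.Set.ofList as) (fun x => x)
     let i := simplifyUpper arr v 0 arr.length
     if i < arr.length then arr.getD i v else v) := by
  set arr := PySem.List.sorted (PySem.Set.ofList as) (fun x => x) with harr
  have hpw : arr.Pairwise (· < ·) := PySem.List.sorted_ofList_pairwise_lt as
  have hmem : ∀ x, x ∈ arr ↔ x ∈ as := by
    intro x
    rw [harr, PySem.List.mem_sorted, PySem.Set.mem_ofList]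
  have hmono := getD_mono_of_pairwise_lt arr hpw
  obtain ⟨h1, h2, h3⟩ := simplifyUpper_spec arr v hmono 0 arr.length
    (by omega) (le_refl _) (by omega) (by omega)
  set i := simplifyUpper arr v 0 arr.length with hi
  by_cases hlt : i < arr.length
  · have hm1 : arr.getD i v = arr[i] := List.getD_eq_getElem arr v hlt
    have hm0 : arr.getD i 0 = arr[i] := List.getD_eq_getElem arr 0 hlt
    set m := arr[i] with hmdef
    have hmas : m ∈ as := (hmem m).mp (List.getElem_mem hlt)
    have hmgt : v < m := by
      have := h2 i (le_refl _) hlt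
      rwa [hm0] at this
    have hmf : m ∈ as.filter (fun x => v < x) := by
      simp [List.mem_filter, hmas, hmgt]
    have hne : as.filter (fun x => v < x) ≠ [] := List.ne_nil_of_mem hmf
    obtain ⟨m', hm'⟩ : ∃ m', PySem.List.min? (as.filter (fun x => v < x)) (fun x => x) = some m' := by
      cases hcase : PySem.List.min? (as.filter (fun x => v < x)) (fun x => x) with
      | none => exact absurd ((PySem.List.min?_eq_none_iff _ _).mp hcase) hne
      | some m' => exact ⟨m', rfl⟩
    have hm'mem : m' ∈ as.filter (fun x => v < x) := PySem.List.min?_mem hm'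
    have hm'as : m' ∈ as := (List.mem_filter.mp hm'mem).1
    have hm'gt : v < m' := by simpa using (List.mem_filter.mp hm'mem).2
    obtain ⟨j, hjl, hje⟩ := List.mem_iff_getElem.mp ((hmem m').mpr hm'as)
    have hji : i ≤ j := by
      by_contra hc
      have := h1 j (by omega)
      rw [List.getD_eq_getElem arr 0 hjl, hje] at this
      omega
    have hle1 : m ≤ m' := by
      have := hmono i j hji hjl
      rw [List.getD_eq_getElem arr 0 hjl, hje, hm0] at this
      exact this
    have hle2 : m' ≤ m := PySem.List.min?_isMin hm' m hmf
    have heq : m' = m := le_antisymm hle2 hle1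
    simp only [hm', heq, ← hi, if_pos hlt, hm1]
  · have hfe : as.filter (fun x => v < x) = [] := by
      rw [List.filter_eq_nil_iff]
      intro x hx
      obtain ⟨j, hjl, hje⟩ := List.mem_iff_getElem.mp ((hmem x).mpr hx)
      have := h1 j (by omega)
      rw [List.getD_eq_getElem arr 0 hjl, hje] at this
      simp
      omega
    have hnone : PySem.List.min? ([] : List Int) (fun x => x) = none :=
      (PySem.List.min?_eq_none_iff _ _).mpr rfl
    rw [hfe]
    simp only [hnone, ← hi, if_neg hlt]

-- the two per-entry step functions agree
lemma step_eq (action_space : List Int) (decision : String)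
    (sp : PySem.Dict Int Int) (kv : Int × Int) :
    (if kv.2 ∈ action_space then
      sp.insert kv.1 kv.2
    else if decision = "rounded_down_policy" then
      sp.insert kv.1 (match PySem.List.max? (action_space.filter (fun x => x < kv.2)) (fun x => x) with
        | some m => m
        | none => kv.2)
    else if decision = "rounded_up_policy" then
      sp.insert kv.1 (match PySem.List.min? (action_space.filter (fun x => kv.2 < x)) (fun x => x) with
        | some m => m
        | none => kv.2)
    else sp) =
    (let arr := PySem.List.sorted (PySem.Set.ofList action_space) (fun x => x)
     if kv.2 ∈ PySem.Set.ofList action_space then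
      sp.insert kv.1 kv.2
    else
      let i := simplifyUpper arr kv.2 0 arr.length
      if decision = "rounded_down_policy" then
        sp.insert kv.1 (if 0 < i then arr.getD (i - 1) kv.2 else kv.2)
      else if decision = "rounded_up_policy" then
        sp.insert kv.1 (if i < arr.length then arr.getD i kv.2 else kv.2)
      else sp) := by
  by_cases hmem : kv.2 ∈ action_space
  · rw [if_pos hmem, if_pos ((PySem.Set.mem_ofList action_space kv.2).mpr hmem)]
  · rw [if_neg hmem, if_neg (fun h => hmem ((PySem.Set.mem_ofList action_space kv.2).mp h))]
    by_cases hd : decision = "rounded_down_policy"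
    · rw [if_pos hd, if_pos hd, down_eq action_space kv.2 hmem]
    · rw [if_neg hd, if_neg hd]
      by_cases hu : decision = "rounded_up_policy"
      · rw [if_pos hu, if_pos hu, up_eq action_space kv.2 hmem]
      · rw [if_neg hu, if_neg hu]

-- ===== VERDICT (by name: the statement is the Claim_ definition above) =====
theorem simplify_spec : Claim_equal_simplify := by
  intro policy action_space decision _
  unfold Spec_simplify simplify simplify_alt
  exact congrArg PySem.Dict.items
    (PySem.List.foldl_congr_mem _ _ _ _ (fun sp kv _ => step_eq action_space decision sp kv))
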